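-- pv_equiv track=rewrite | github.com/Theo-Ing/ovning | ovning6losningar/word_length.py | max_word_length
-- ===== SOURCE A (Python) =====
-- def max_word_length(text):
--     text = text + " "
--     max_length = 0
--     current_length = 0
--     for letter in text:
--         if letter.isalpha():
--             current_length += 1
--         else:
--             if current_length > max_length:
--                 max_length = current_length
--             current_length = 0
--     return max_length
-- ===== SOURCE B (Python) =====
-- def max_word_length(text):
--     best = 0
--     i = 0
--     n = len(text)
--     while i < n:
--         j = i
--         while j < n and text[j].isalpha():
--             j += 1
--         if j - i > best:
--             best = j - i
--         i = j if j > i else i + 1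
--     return best
-- ===== Notes on version B (the rewrite author's own statement) =====
-- stated objective: alternative
-- what changed: Replaces A's single pass with a running counter and an appended-space sentinel by a two-level run scan: an outer loop over run starts and an inner loop that finds the end of each maximal alphabetic run, tracking only the best length.
import Mathlib
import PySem

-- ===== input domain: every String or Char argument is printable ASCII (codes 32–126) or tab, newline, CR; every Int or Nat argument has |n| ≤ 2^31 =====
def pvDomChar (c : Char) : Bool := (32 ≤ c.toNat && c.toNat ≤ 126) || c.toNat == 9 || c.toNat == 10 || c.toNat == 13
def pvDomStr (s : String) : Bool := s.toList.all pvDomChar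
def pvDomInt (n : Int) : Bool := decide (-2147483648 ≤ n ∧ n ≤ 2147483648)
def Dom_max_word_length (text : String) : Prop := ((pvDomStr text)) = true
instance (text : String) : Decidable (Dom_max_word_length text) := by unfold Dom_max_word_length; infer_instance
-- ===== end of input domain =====

-- B replaces A's sentinel-terminated counter pass by a two-level scan over maximal
-- alphabetic runs (alternative decomposition; same cost).


-- ===== PORT A =====
-- 'text = text + " "' then 'for letter in text' iterates the chars of text followed by ' '.
def max_word_length (text : String) : Int :=
  (((text.toList ++ [' ']).foldl
    (fun (st : Int × Int) letter =>
      if PySem.Chars.isalpha letter then (st.1, st.2 + 1)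
      else if st.2 > st.1 then (st.2, 0) else (st.1, 0))
    (0, 0))).1

-- ===== PORT B =====
-- outer while-loop of Source B: at each position, the inner while-loop counts the alphabetic
-- run starting there (= length of the isalpha-takeWhile prefix), then jumps past it.
def mwlGo : List Char → Int → Int
  | [], best => best
  | c :: cs, best =>
    let run := ((c :: cs).takeWhile PySem.Chars.isalpha).length
    if _h : run = 0 then mwlGo cs best
    else mwlGo ((c :: cs).drop run) (if (run : Int) > best then (run : Int) else best)
termination_by l _ => l.length
decreasing_by
  · simp
  · simp only [List.length_drop]
    have : run ≤ (c :: cs).length :=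
      (List.takeWhile_sublist (p := PySem.Chars.isalpha) (l := c :: cs)).length_le
    omega

def max_word_length_alt (text : String) : Int := mwlGo text.toList 0

-- ===== PRECONDITION & SPEC =====
def Spec_max_word_length (text : String) (out : Int) : Prop := out = max_word_length_alt text
instance (text : String) (out : Int) : Decidable (Spec_max_word_length text out) := by unfold Spec_max_word_length; infer_instance

-- ===== CLAIM (what is proved, stated in full; the proofs are below) =====
def Claim_equal_max_word_length : Prop := ∀ (text : String), Dom_max_word_length text → Spec_max_word_length text (max_word_length text)

-- ===== LEMMAS AND PROOFS =====

-- reference function: the maximum alphabetic-run length of l, given a current open run of length cur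
def mwlSpec : List Char → Int → Int
  | [], cur => cur
  | c :: cs, cur =>
    if PySem.Chars.isalpha c then mwlSpec cs (cur + 1) else max cur (mwlSpec cs 0)

theorem mwlSpec_nonneg (l : List Char) : ∀ cur : Int, 0 ≤ cur → 0 ≤ mwlSpec l cur := by
  induction l with
  | nil => intro cur h; simpa [mwlSpec] using h
  | cons c cs ih =>
    intro cur h
    simp only [mwlSpec]
    split
    · exact ih _ (by omega)
    · exact le_max_of_le_left h

theorem mwlSpec_prefix (l : List Char) : ∀ cur : Int, 0 ≤ cur →
    mwlSpec l cur = max (cur + ((l.takeWhile PySem.Chars.isalpha).length : Int))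
      (mwlSpec (l.dropWhile PySem.Chars.isalpha) 0) := by
  induction l with
  | nil => intro cur h; simp [mwlSpec]; omega
  | cons c cs ih =>
    intro cur h
    by_cases hc : PySem.Chars.isalpha c
    · simp only [mwlSpec, List.takeWhile_cons, List.dropWhile_cons, hc, if_pos]
      rw [ih (cur + 1) (by omega)]
      congr 1
      simp only [List.length_cons]
      push_cast
      ring
    · have h0 : (0:Int) ≤ mwlSpec cs 0 := mwlSpec_nonneg cs 0 le_rfl
      simp only [mwlSpec, List.takeWhile_cons, List.dropWhile_cons, hc, Bool.false_eq_true,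
        ite_false, List.length_nil]
      rw [max_eq_right h0]
      omega

theorem mwlGo_eq (n : Nat) : ∀ l : List Char, l.length ≤ n → ∀ best : Int, 0 ≤ best →
    mwlGo l best = max best (mwlSpec l 0) := by
  induction n with
  | zero =>
    intro l hl best hb
    have : l = [] := List.length_eq_zero_iff.mp (Nat.le_zero.mp hl)
    subst this
    simp [mwlGo, mwlSpec]
    omega
  | succ n ih =>
    intro l hl best hb
    match l with
    | [] => simp [mwlGo, mwlSpec]; omega
    | c :: cs =>
      by_cases hc : PySem.Chars.isalpha c
      · -- run ≥ 1: jump past the run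
        have htw : (c :: cs).takeWhile PySem.Chars.isalpha
            = c :: cs.takeWhile PySem.Chars.isalpha := by simp [hc]
        set run := ((c :: cs).takeWhile PySem.Chars.isalpha).length with hrun
        have hpos : run ≠ 0 := by rw [hrun, htw]; simp
        have hdrop : (c :: cs).drop run = (c :: cs).dropWhile PySem.Chars.isalpha := by
          conv_lhs => rw [← List.takeWhile_append_dropWhile
            (p := PySem.Chars.isalpha) (l := c :: cs)]
          rw [hrun, List.drop_left]
        have hlen : ((c :: cs).dropWhile PySem.Chars.isalpha).length ≤ n := by
          have := List.length_dropWhile_le (p := PySem.Chars.isalpha) (l := c :: cs)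
          have h2 : ((c :: cs).dropWhile PySem.Chars.isalpha).length
              = (c :: cs).length - run := by
            conv_lhs => rw [← hdrop]
            simp
          rw [h2]
          simp only [List.length_cons] at hl ⊢
          omega
        rw [mwlGo, dif_neg hpos, hdrop,
          ih _ hlen _ (by split <;> [positivity; exact hb])]
        rw [mwlSpec_prefix (c :: cs) 0 le_rfl]
        rw [← hrun]
        have h0 : (0:Int) ≤ mwlSpec ((c :: cs).dropWhile PySem.Chars.isalpha) 0 :=
          mwlSpec_nonneg _ 0 le_rfl
        simp only [zero_add]
        rcases le_total best (run : Int) with h | h <;>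
          rcases le_total (run : Int) (mwlSpec ((c :: cs).dropWhile PySem.Chars.isalpha) 0)
            with h2 | h2 <;>
          simp [max_def] <;> split_ifs <;> omega
      · -- run = 0: skip one character
        have hz : ((c :: cs).takeWhile PySem.Chars.isalpha).length = 0 := by
          simp [hc]
        have hcs : cs.length ≤ n := by simp at hl; omega
        rw [mwlGo, dif_pos hz, ih cs hcs best hb]
        have h0 : (0:Int) ≤ mwlSpec cs 0 := mwlSpec_nonneg cs 0 le_rfl
        conv_rhs => rw [mwlSpec]
        simp [hc, max_eq_right h0]

theorem foldA_eq (l : List Char) : ∀ best cur : Int, 0 ≤ best → 0 ≤ cur →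
    ((l ++ [' ']).foldl
      (fun (st : Int × Int) letter =>
        if PySem.Chars.isalpha letter then (st.1, st.2 + 1)
        else if st.2 > st.1 then (st.2, 0) else (st.1, 0))
      (best, cur)).1 = max best (mwlSpec l cur) := by
  induction l with
  | nil =>
    intro best cur hb hc
    have hsp : PySem.Chars.isalpha ' ' = false := by decide
    simp only [List.nil_append, List.foldl_cons, List.foldl_nil, hsp, Bool.false_eq_true,
      ite_false, mwlSpec]
    split_ifs with h
    · simp [max_eq_right (le_of_lt h)]
    · simp [max_eq_left (not_lt.mp h)]
  | cons c cs ih =>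
    intro best cur hb hc
    by_cases h : PySem.Chars.isalpha c
    · simp only [List.cons_append, List.foldl_cons, h, if_true, mwlSpec]
      exact ih best (cur + 1) hb (by omega)
    · simp only [List.cons_append, List.foldl_cons, h, Bool.false_eq_true, ite_false, mwlSpec]
      have h0 : (0:Int) ≤ mwlSpec cs 0 := mwlSpec_nonneg cs 0 le_rfl
      split_ifs with hgt
      · rw [ih cur 0 (by omega) le_rfl]
        have hle : best ≤ max cur (mwlSpec cs 0) :=
          le_trans (le_of_lt hgt) (le_max_left _ _)
        rw [max_eq_right hle]
      · rw [ih best 0 hb le_rfl]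
        conv_rhs => rw [← max_assoc, max_eq_left (not_lt.mp hgt)]

-- ===== VERDICT (by name: the statement is the Claim_ definition above) =====
theorem max_word_length_spec : Claim_equal_max_word_length := by
  intro text _
  unfold Spec_max_word_length max_word_length max_word_length_alt
  rw [foldA_eq text.toList 0 0 le_rfl le_rfl,
    mwlGo_eq text.toList.length text.toList le_rfl 0 le_rfl]
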